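-- pv_equiv track=rewrite | github.com/piotr-kulpinski/artifacts-security-iridium | gr-iridiumtx/utils/iridium_message.py | interleave3
-- ===== SOURCE A (Python) =====
-- def interleave3(first, second, third):
--     symbols = []
--     for i in range(0, len(first), 2):
--         symbols.append(first[i+1] + first[i])
--         symbols.append(second[i+1] + second[i])
--         symbols.append(third[i+1] + third[i])
--     interleaved = ''.join(symbols)[::-1]
--     return interleaved
-- ===== SOURCE B (Python) =====
-- def interleave3(first, second, third):
--     # Walk the 2-char blocks back-to-front and emit each stream's block unswapped:
--     # reversing a concatenation of 2-char swapped blocks equals emitting the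
--     # unswapped blocks in reverse block order with the stream order inverted.
--     return ''.join(s[i:i + 2]
--                    for i in range(len(first) - 2, -1, -2)
--                    for s in (third, second, first))
-- ===== Notes on version B (the rewrite author's own statement) =====
-- stated objective: simpler
-- what changed: B iterates the 2-char block indices back-to-front and emits each stream's block unswapped via slicing, instead of A's forward loop that swaps each character pair and then reverses the whole joined string.
import Mathlib
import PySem

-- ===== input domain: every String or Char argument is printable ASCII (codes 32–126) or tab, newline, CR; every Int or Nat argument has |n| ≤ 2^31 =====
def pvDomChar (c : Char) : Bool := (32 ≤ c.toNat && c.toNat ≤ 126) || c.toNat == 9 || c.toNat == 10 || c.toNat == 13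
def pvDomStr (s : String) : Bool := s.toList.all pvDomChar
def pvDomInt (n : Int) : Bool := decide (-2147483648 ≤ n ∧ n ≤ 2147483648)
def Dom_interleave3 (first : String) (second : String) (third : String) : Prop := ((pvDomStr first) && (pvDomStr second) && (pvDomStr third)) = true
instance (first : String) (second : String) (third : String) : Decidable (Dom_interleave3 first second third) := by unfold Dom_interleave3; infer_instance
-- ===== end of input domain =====

-- B walks the 2-char blocks back-to-front emitting them unswapped (no per-char swap, no final whole-string reversal); same return value as A on Pre_.

-- ===== PORT A =====
-- forward loop over even i; each iteration appends the swapped 2-char block of each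
-- stream; join, then '[::-1]' = reverse. pyGetD's default is never read on Pre_
-- (Pre_ excludes exactly the inputs where Python's first[i+1]/second[i]/… raises IndexError).
def interleave3 (first : String) (second : String) (third : String) : String :=
  let f := first.toList
  let s := second.toList
  let t := third.toList
  let symbols : List (List Char) :=
    (PySem.List.pyRange 0 (PySem.Str.len first) 2).foldl
      (fun acc i =>
        acc ++ [[PySem.List.pyGetD f (i+1) ' ', PySem.List.pyGetD f i ' '],
                [PySem.List.pyGetD s (i+1) ' ', PySem.List.pyGetD s i ' '],
                [PySem.List.pyGetD t (i+1) ' ', PySem.List.pyGetD t i ' ']]) []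
  String.ofList (PySem.Chars.join [] symbols).reverse

-- ===== PORT B =====
-- generator: for i in range(len(first)-2, -1, -2), for stream in (third, second, first): yield stream[i:i+2]; join.
def interleave3_alt (first : String) (second : String) (third : String) : String :=
  String.ofList (PySem.Chars.join []
    ((PySem.List.pyRange (PySem.Str.len first - 2) (-1) (-2)).flatMap
      (fun i =>
        [third.toList, second.toList, first.toList].map
          (fun cs => PySem.List.slice cs (some i) (some (i+2))))))

-- ===== PRECONDITION & SPEC =====
-- Pre_ excludes exactly the inputs where A raises IndexError: odd len(first), or
-- second/third shorter than first.
def Pre_interleave3 (first : String) (second : String) (third : String) : Prop :=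
  first.toList.length % 2 = 0 ∧ first.toList.length ≤ second.toList.length ∧
    first.toList.length ≤ third.toList.length
instance (first : String) (second : String) (third : String) : Decidable (Pre_interleave3 first second third) := by unfold Pre_interleave3; infer_instance
def pvWitness_interleave3 : String × String × String := ("abcd", "efgh", "ijkl")

def Spec_interleave3 (first : String) (second : String) (third : String) (out : String) : Prop := out = interleave3_alt first second third
instance (first : String) (second : String) (third : String) (out : String) : Decidable (Spec_interleave3 first second third out) := by unfold Spec_interleave3; infer_instance

-- ===== CLAIM (what is proved, stated in full; the proofs are below) =====
def Claim_equal_interleave3 : Prop := ∀ (first : String) (second : String) (third : String), Dom_interleave3 first second third → Pre_interleave3 first second third → Spec_interleave3 first second third (interleave3 first second third)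

-- ===== LEMMAS AND PROOFS =====

theorem join_nil_flatten (parts : List (List Char)) :
    PySem.Chars.join [] parts = parts.flatten := by
  induction parts with
  | nil => rfl
  | cons a l ih =>
    cases l with
    | nil => simp [PySem.Chars.join, List.intercalate]
    | cons b m =>
      rw [PySem.Chars.join_cons_cons, ih]
      simp

theorem take_two_drop (l : List Char) (m : Nat) (h : m + 1 < l.length) :
    (l.drop m).take 2 = [l[m], l[m+1]] := by
  rw [List.drop_eq_getElem_cons (by omega), List.drop_eq_getElem_cons h]
  rfl

theorem up_range (k : Nat) :
    PySem.List.pyRange 0 (2*k) 2 = (List.range k).map (fun (j : Nat) => (2*j : Int)) := by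
  rw [PySem.List.pyRange_of_pos 0 (2*k) (by norm_num)]
  rcases Nat.eq_zero_or_pos k with hk | hk
  · simp [hk]
  · have h1 : (0 : Int) < 2*k := by positivity
    rw [if_pos h1]
    have hc : ((2*(k:Int) - 0 + 2 - 1) / 2).toNat = k := by omega
    rw [hc]
    simp [mul_comm]

theorem down_range (k : Nat) :
    PySem.List.pyRange (2*k - 2) (-1) (-2) =
      ((List.range k).map (fun (j : Nat) => (2*j : Int))).reverse := by
  rw [PySem.List.pyRange]
  rcases Nat.eq_zero_or_pos k with hk | hk
  · subst hk; simp
  · have h0 : ¬ ((-2 : Int) = 0) := by norm_num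
    have h1 : ¬ ((0 : Int) < -2) := by norm_num
    have h2 : (-1 : Int) < 2*k - 2 := by omega
    simp only [h0, if_false, h1, h2, if_true]
    have harg : (2*(k:Int) - 2 - (-1) + - -2 - 1) = 2*k := by ring
    have hs2 : (- -2 : Int) = 2 := by norm_num
    rw [harg, hs2]
    have hc : ((2*(k:Int)) / 2).toNat = k := by omega
    rw [hc]
    apply List.ext_getElem
    · simp
    · intro j hj hj'
      simp only [List.length_map, List.length_range] at hj hj'
      simp only [List.getElem_reverse, List.getElem_map, List.getElem_range,
        List.length_map, List.length_range]
      omega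

theorem flatten_flatMap (L : List Int) (G : Int → List (List Char)) :
    (L.flatMap G).flatten = (L.map (fun i => (G i).flatten)).flatten := by
  induction L with
  | nil => rfl
  | cons a l ih => simp [List.flatMap_cons, ih]

theorem rev_flat (L : List Int) (F H : Int → List Char)
    (h : ∀ i ∈ L, (F i).reverse = H i) :
    (L.map F).flatten.reverse = (L.reverse.map H).flatten := by
  induction L with
  | nil => rfl
  | cons a l ih =>
    simp only [List.map_cons, List.flatten_cons, List.reverse_append,
      List.reverse_cons, List.map_append, List.map_cons, List.map_nil,
      List.flatten_append, List.flatten_cons, List.flatten_nil, List.append_nil]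
    rw [ih (fun i hi => h i (List.mem_cons_of_mem a hi)), h a (List.mem_cons_self)]

theorem core (f s t : List Char) (k : Nat)
    (hf : f.length = 2*k) (hs : 2*k ≤ s.length) (ht : 2*k ≤ t.length) :
    (PySem.Chars.join []
        ((PySem.List.pyRange 0 (2*k) 2).foldl
          (fun acc i =>
            acc ++ [[PySem.List.pyGetD f (i+1) ' ', PySem.List.pyGetD f i ' '],
                    [PySem.List.pyGetD s (i+1) ' ', PySem.List.pyGetD s i ' '],
                    [PySem.List.pyGetD t (i+1) ' ', PySem.List.pyGetD t i ' ']]) [])).reverse =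
      PySem.Chars.join []
        ((PySem.List.pyRange (2*k - 2) (-1) (-2)).flatMap
          (fun i =>
            [t, s, f].map (fun cs => PySem.List.slice cs (some i) (some (i+2))))) := by
  rw [PySem.List.foldl_append_eq_flatMap, List.nil_append, join_nil_flatten, join_nil_flatten,
    up_range, down_range, flatten_flatMap, flatten_flatMap]
  apply rev_flat
  intro i hi
  simp only [List.mem_map, List.mem_range] at hi
  obtain ⟨j, hjk, rfl⟩ := hi
  have gf : ∀ (l : List Char) (hl : 2*k ≤ l.length),
      PySem.List.slice l (some (2*(j:Int))) (some (2*(j:Int)+2)) =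
        [l[2*j]'(by omega), l[2*j+1]'(by omega)] := by
    intro l hl
    rw [PySem.List.slice_toNat (a := 2*(j:Int)) (b := 2*(j:Int)+2) l (by omega) (by omega)]
    have h2 : ((2*(j:Int)+2).toNat - (2*(j:Int)).toNat) = 2 := by omega
    have hif : (2*(j:Int)).toNat = 2*j := by omega
    rw [h2, hif, take_two_drop l (2*j) (by omega)]
  have gd : ∀ (l : List Char) (m : Nat) (h1 : m < l.length),
      PySem.List.pyGetD l (m:Int) ' ' = l[m] := by
    intro l m h1
    rw [PySem.List.pyGetD_eq_getElem l ' ' (by omega) (by exact_mod_cast h1)]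
    simp
  have e0 : 2*(j:Int) = ((2*j : Nat) : Int) := by push_cast; ring
  have e1 : ((2*j : Nat) : Int) + 1 = ((2*j+1 : Nat) : Int) := by push_cast; ring
  simp only [List.map_cons, List.map_nil, List.flatten_cons, List.flatten_nil,
    List.append_nil, List.reverse_append, List.reverse_cons]
  rw [gf f (by omega), gf s hs, gf t ht, e0, e1,
      gd f (2*j) (by omega), gd f (2*j+1) (by omega),
      gd s (2*j) (by omega), gd s (2*j+1) (by omega),
      gd t (2*j) (by omega), gd t (2*j+1) (by omega)]
  simp

-- ===== VERDICT (by name: the statement is the Claim_ definition above) =====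
theorem interleave3_spec : Claim_equal_interleave3 := by
  intro first second third _ hpre
  obtain ⟨heven, hs, ht⟩ := hpre
  unfold Spec_interleave3 interleave3 interleave3_alt
  obtain ⟨k, hk⟩ : ∃ k, first.toList.length = 2*k := ⟨first.toList.length / 2, by omega⟩
  have hlen : PySem.Str.len first = ((2*k : Nat) : Int) := by
    simp [PySem.Str.len_eq, hk]
  simp only [hlen]
  congr 1
  have := core first.toList second.toList third.toList k hk (by omega) (by omega)
  exact_mod_cast this
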